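-- pv_equiv track=rewrite | github.com/c-w-o/Arma3Server_v2 | launcher/arma_launcher/steamcmd.py | _mask_steamcmd
-- ===== SOURCE A (Python) =====
-- import shlex
-- from typing import List, Optional
--
-- def _mask_steamcmd(cmd: List[str]) -> str:
--     """
--     Mask password in: +login <user> <password>
--     Keep everything else visible for debugging.
--     """
--     out = []
--     i = 0
--     while i < len(cmd):
--         tok = cmd[i]
--         out.append(tok)
--
--         if tok == "+login":
--             # expected: +login user pass
--             if i + 1 < len(cmd):
--                 out.append(cmd[i + 1])  # user
--                 #out.append("**user**")
--             if i + 2 < len(cmd):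
--                 out.append("***pw***")  # password masked
--             i += 3
--             continue
--
--         i += 1
--
--     # pretty printing with quoting so spaces/special chars are readable
--     return " ".join(shlex.quote(x) for x in out)
-- ===== SOURCE B (Python) =====
-- import re
-- from typing import List
--
-- _UNSAFE = re.compile(r'[^\w@%+=:,./-]', re.ASCII).search
--
--
-- def _quote(s: str) -> str:
--     """shlex.quote, inlined (same rule as the stdlib)."""
--     if not s:
--         return "''"
--     if _UNSAFE(s) is None:
--         return s
--     return "'" + s.replace("'", "'\"'\"'") + "'"
--
--
-- def _mask_steamcmd(cmd: List[str]) -> str: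
--     """Single forward for-loop with a 3-state machine instead of index jumping."""
--     out = []
--     state = 0  # 0 = normal, 1 = expecting user, 2 = expecting password
--     for tok in cmd:
--         if state == 0:
--             out.append(tok)
--             if tok == "+login":
--                 state = 1
--         elif state == 1:
--             out.append(tok)
--             state = 2
--         else:
--             out.append("***pw***")
--             state = 0
--     return " ".join(_quote(x) for x in out)
-- ===== Notes on version B (the rewrite author's own statement) =====
-- stated objective: simpler
-- what changed: Replaces A's index-jumping while loop (i += 3 after '+login' with bound checks on i+1/i+2) by a single forward for-loop over the tokens carrying a 3-state machine (normal / expect-user / expect-password).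
import Mathlib
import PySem

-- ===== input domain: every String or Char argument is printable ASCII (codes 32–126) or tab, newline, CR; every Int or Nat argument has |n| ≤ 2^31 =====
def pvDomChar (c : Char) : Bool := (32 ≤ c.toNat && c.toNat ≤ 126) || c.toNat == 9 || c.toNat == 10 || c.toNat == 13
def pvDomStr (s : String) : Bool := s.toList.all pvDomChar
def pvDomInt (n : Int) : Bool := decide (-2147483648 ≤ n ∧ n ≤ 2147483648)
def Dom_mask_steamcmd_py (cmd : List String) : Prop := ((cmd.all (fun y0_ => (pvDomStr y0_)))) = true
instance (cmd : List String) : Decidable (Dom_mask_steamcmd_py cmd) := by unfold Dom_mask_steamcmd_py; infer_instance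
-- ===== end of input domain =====

-- B replaces A's index-jumping while loop by a single forward fold with a 3-state machine; objective: simpler.

-- shlex.quote, ported by hand (no PySem primitive); exact on the ASCII domain
-- (re.ASCII \w plus @%+=:,./- are the safe characters; otherwise wrap in single quotes
--  with ' replaced by '"'"').
def pvShlexSafe (c : Char) : Bool :=
  ('a' ≤ c && c ≤ 'z') || ('A' ≤ c && c ≤ 'Z') || ('0' ≤ c && c ≤ '9') ||
  c == '_' || c == '@' || c == '%' || c == '+' || c == '=' || c == ':' ||
  c == ',' || c == '.' || c == '/' || c == '-'

def pvShlexQuote (s : String) : String :=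
  let cs := s.toList
  if cs.isEmpty then "''"
  else if cs.all pvShlexSafe then s
  else String.ofList ('\'' :: cs.flatMap (fun c => if c = '\'' then ['\'', '"', '\'', '"', '\''] else [c]) ++ ['\''])

-- ===== PORT A =====
-- A's while loop: index i jumps by 3 after '+login' (consuming user and password slots), else by 1.
def pvMaskLoopA (cmd : List String) (i : Nat) (out : List String) : List String :=
  if h : i < cmd.length then
    let tok := cmd[i]
    let out1 := out ++ [tok]
    if tok = "+login" then
      let out2 := if h1 : i + 1 < cmd.length then out1 ++ [cmd[i+1]] else out1
      let out3 := if i + 2 < cmd.length then out2 ++ ["***pw***"] else out2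
      pvMaskLoopA cmd (i + 3) out3
    else
      pvMaskLoopA cmd (i + 1) out1
  else out
termination_by cmd.length - i

def mask_steamcmd_py (cmd : List String) : String :=
  PySem.Str.join " " ((pvMaskLoopA cmd 0 []).map pvShlexQuote)

-- ===== PORT B =====
-- B's for loop: state 0 = normal, 1 = expecting user, 2 = expecting password.
def pvMaskStepB (st : Nat × List String) (tok : String) : Nat × List String :=
  if st.1 = 0 then
    ((if tok = "+login" then 1 else 0), st.2 ++ [tok])
  else if st.1 = 1 then
    (2, st.2 ++ [tok])
  else
    (0, st.2 ++ ["***pw***"])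

def mask_steamcmd_py_alt (cmd : List String) : String :=
  PySem.Str.join " " ((cmd.foldl pvMaskStepB (0, [])).2.map pvShlexQuote)

-- ===== PRECONDITION & SPEC =====
def Spec_mask_steamcmd_py (cmd : List String) (out : String) : Prop := out = mask_steamcmd_py_alt cmd
instance (cmd : List String) (out : String) : Decidable (Spec_mask_steamcmd_py cmd out) := by unfold Spec_mask_steamcmd_py; infer_instance

-- ===== CLAIM (what is proved, stated in full; the proofs are below) =====
def Claim_equal_mask_steamcmd_py : Prop := ∀ (cmd : List String), Dom_mask_steamcmd_py cmd → Spec_mask_steamcmd_py cmd (mask_steamcmd_py cmd)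

-- ===== LEMMAS AND PROOFS =====

lemma pvMaskLoopA_eq_foldB_aux (cmd : List String) (n : Nat) :
    ∀ i out, cmd.length - i ≤ n →
      pvMaskLoopA cmd i out = ((cmd.drop i).foldl pvMaskStepB (0, out)).2 := by
  induction n with
  | zero =>
    intro i out hn
    have hge : cmd.length ≤ i := by omega
    rw [pvMaskLoopA, dif_neg (by omega), List.drop_eq_nil_of_le hge]
    rfl
  | succ n ih =>
    intro i out hn
    by_cases h : i < cmd.length
    · rw [pvMaskLoopA, dif_pos h, List.drop_eq_getElem_cons h, List.foldl_cons]
      by_cases ht : cmd[i] = "+login"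
      · rw [if_pos ht]
        dsimp only
        have hstep0 : pvMaskStepB (0, out) cmd[i] = (1, out ++ [cmd[i]]) := by
          simp [pvMaskStepB, ht]
        rw [hstep0]
        by_cases h1 : i + 1 < cmd.length
        · rw [dif_pos h1, List.drop_eq_getElem_cons h1, List.foldl_cons]
          have hstep1 : pvMaskStepB (1, out ++ [cmd[i]]) cmd[i+1]
              = (2, out ++ [cmd[i]] ++ [cmd[i+1]]) := by
            simp [pvMaskStepB]
          rw [hstep1]
          by_cases h2 : i + 2 < cmd.length
          · rw [if_pos h2, List.drop_eq_getElem_cons h2, List.foldl_cons]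
            have hstep2 : pvMaskStepB (2, out ++ [cmd[i]] ++ [cmd[i+1]]) cmd[i+2]
                = (0, out ++ [cmd[i]] ++ [cmd[i+1]] ++ ["***pw***"]) := by
              simp [pvMaskStepB]
            rw [hstep2]
            exact ih (i + 3) _ (by omega)
          · rw [if_neg h2, List.drop_eq_nil_of_le (by omega)]
            rw [ih (i + 3) _ (by omega), List.drop_eq_nil_of_le (by omega)]
            rfl
        · rw [dif_neg h1, if_neg (by omega), List.drop_eq_nil_of_le (by omega)]
          rw [ih (i + 3) _ (by omega), List.drop_eq_nil_of_le (by omega)]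
          rfl
      · rw [if_neg ht]
        have hstep : pvMaskStepB (0, out) cmd[i] = (0, out ++ [cmd[i]]) := by
          simp [pvMaskStepB, ht]
        rw [hstep]
        exact ih (i + 1) _ (by omega)
    · rw [pvMaskLoopA, dif_neg h, List.drop_eq_nil_of_le (by omega)]
      rfl

lemma pvMaskLoopA_eq_foldB (cmd : List String) (i : Nat) (out : List String) :
    pvMaskLoopA cmd i out = ((cmd.drop i).foldl pvMaskStepB (0, out)).2 :=
  pvMaskLoopA_eq_foldB_aux cmd (cmd.length - i) i out le_rfl

theorem mask_steamcmd_py_spec : Claim_equal_mask_steamcmd_py := by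
  intro cmd _
  unfold Spec_mask_steamcmd_py mask_steamcmd_py mask_steamcmd_py_alt
  rw [pvMaskLoopA_eq_foldB]
  simp
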